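-- pv_equiv track=rewrite | github.com/mattlarkin8/automation | automation/automation.py | add_dash
-- ===== SOURCE A (Python) =====
-- def add_dash(phones):
--     new_phones = []
--
--     for phone in phones:
--         new_phone = ""
--         count = 0
--         dash = 0
--         for char in phone:
--             count += 1
--             new_phone += char
--             if count % 3 == 0 and dash < 2:
--                 new_phone += "-"
--                 dash += 1
--         new_phones.append(new_phone)
--
--     return new_phones
-- ===== SOURCE B (Python) =====
-- def add_dash(phones):
--     return [
--         p[:3] + ("-" if len(p) >= 3 else "")
--         + p[3:6] + ("-" if len(p) >= 6 else "")
--         + p[6:]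
--         for p in phones
--     ]
-- ===== Notes on version B (the rewrite author's own statement) =====
-- stated objective: simpler
-- what changed: Replaced the per-character counter/dash accumulation loop with direct segment slicing: phone[:3] + optional dash + phone[3:6] + optional dash + phone[6:], in a list comprehension.
import Mathlib
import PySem

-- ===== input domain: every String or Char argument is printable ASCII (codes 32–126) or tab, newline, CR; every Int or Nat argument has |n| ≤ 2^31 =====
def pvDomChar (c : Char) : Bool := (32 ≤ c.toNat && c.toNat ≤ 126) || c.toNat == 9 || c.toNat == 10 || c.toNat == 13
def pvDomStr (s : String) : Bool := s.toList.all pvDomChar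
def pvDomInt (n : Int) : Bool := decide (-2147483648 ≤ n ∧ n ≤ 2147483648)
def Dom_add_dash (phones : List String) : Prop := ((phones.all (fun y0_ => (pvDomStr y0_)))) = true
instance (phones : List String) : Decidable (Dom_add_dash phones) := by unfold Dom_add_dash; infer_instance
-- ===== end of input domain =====

-- B replaces A's char-by-char counter/dash loop with direct segment slicing (simpler decomposition; same value).


-- ===== PORT A =====
-- inner loop over the characters of one phone: state = (accumulated chars, count, dash)
def addDashLoop : List Char → List Char → Int → Int → List Char
  | acc, [], _, _ => acc
  | acc, c :: cs, count, dash =>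
    let count' := count + 1
    let acc' := acc ++ [c]
    if PySem.Int.mod count' 3 == 0 && dash < 2 then
      addDashLoop (acc' ++ ['-']) cs count' (dash + 1)
    else
      addDashLoop acc' cs count' dash

def add_dash (phones : List String) : List String :=
  phones.foldl (fun new_phones phone =>
    new_phones ++ [String.ofList (addDashLoop [] phone.toList 0 0)]) []

-- ===== PORT B =====
-- one phone by slicing: p[:3] + dash? + p[3:6] + dash? + p[6:]
def addDashSlice (p : String) : String :=
  let cs := p.toList
  String.ofList (cs.take 3
    ++ (if cs.length ≥ 3 then ['-'] else [])
    ++ (cs.drop 3).take 3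
    ++ (if cs.length ≥ 6 then ['-'] else [])
    ++ cs.drop 6)

def add_dash_alt (phones : List String) : List String :=
  phones.map addDashSlice

-- ===== PRECONDITION & SPEC =====
def Spec_add_dash (phones : List String) (out : List String) : Prop := out = add_dash_alt phones
instance (phones : List String) (out : List String) : Decidable (Spec_add_dash phones out) := by unfold Spec_add_dash; infer_instance

-- ===== CLAIM (what is proved, stated in full; the proofs are below) =====
def Claim_equal_add_dash : Prop := ∀ (phones : List String), Dom_add_dash phones → Spec_add_dash phones (add_dash phones)

-- ===== LEMMAS AND PROOFS =====

-- once dash = 2 the condition is always false: the loop appends the rest verbatim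
theorem addDashLoop_dash2 (cs : List Char) (acc : List Char) (count : Int) :
    addDashLoop acc cs count 2 = acc ++ cs := by
  induction cs generalizing acc count with
  | nil => simp [addDashLoop]
  | cons c cs ih => simp [addDashLoop, ih]

-- the loop on one phone equals the slice formulation
theorem addDashLoop_eq_slice (cs : List Char) :
    addDashLoop [] cs 0 0 =
      cs.take 3 ++ (if cs.length ≥ 3 then ['-'] else [])
        ++ (cs.drop 3).take 3 ++ (if cs.length ≥ 6 then ['-'] else [])
        ++ cs.drop 6 := by
  match cs with
  | [] => simp [addDashLoop]
  | [a] => simp [addDashLoop, PySem.Int.mod]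
  | [a, b] => simp [addDashLoop, PySem.Int.mod]
  | [a, b, c] => simp [addDashLoop, PySem.Int.mod]
  | [a, b, c, d] => simp [addDashLoop, PySem.Int.mod]
  | [a, b, c, d, e] => simp [addDashLoop, PySem.Int.mod]
  | a :: b :: c :: d :: e :: f :: rest =>
    simp [addDashLoop, PySem.Int.mod, addDashLoop_dash2]

-- folding with back-appends is mapping
theorem foldl_append_map (f : String → String) (l : List String) (init : List String) :
    l.foldl (fun acc x => acc ++ [f x]) init = init ++ l.map f := by
  induction l generalizing init with
  | nil => simp
  | cons x xs ih => simp [List.foldl, ih]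

-- ===== VERDICT (by name: the statement is the Claim_ definition above) =====
theorem add_dash_spec : Claim_equal_add_dash := by
  intro phones _
  unfold Spec_add_dash add_dash add_dash_alt
  rw [foldl_append_map (fun phone => String.ofList (addDashLoop [] phone.toList 0 0))]
  simp only [List.nil_append]
  apply List.map_congr_left
  intro p _
  rw [addDashLoop_eq_slice]
  rfl
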